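-- pv_equiv track=rewrite | github.com/15207175601/flights_monitor | discover_group.py | _find_common_destinations
-- ===== SOURCE A (Python) =====
-- def _find_common_destinations(travelers, city_results):
--     """找到所有人都有航班/本地的共同目的地 key 集合"""
--     traveler_home_keys = {}
--     for code, name in travelers:
--         traveler_home_keys[name] = {code, name}
--
--     all_dest_keys = set()
--     for dest_map in city_results.values():
--         all_dest_keys.update(dest_map.keys())
--
--     common_keys = set()
--     for key in all_dest_keys:
--         is_common = True
--         for code, name in travelers:
--             has_result = key in city_results.get(name, {})
--             is_home = key in traveler_home_keys[name]
--             if not has_result and not is_home: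
--                 is_common = False
--                 break
--         if is_common:
--             common_keys.add(key)
--
--     return common_keys, traveler_home_keys
-- ===== SOURCE B (Python) =====
-- def _home_keys(travelers):
--     return {name: {code, name} for code, name in travelers}
--
--
-- def _satisfied(name, city_results, home):
--     return set(city_results.get(name, {})) | home[name]
--
--
-- def _find_common_destinations(travelers, city_results):
--     """Progressive set intersection over travelers instead of per-key re-scanning."""
--     home = _home_keys(travelers)
--
--     all_dest_keys = set()
--     for dest_map in city_results.values():
--         all_dest_keys |= set(dest_map)
--
--     common_keys = all_dest_keys
--     for _code, name in travelers:
--         common_keys &= _satisfied(name, city_results, home)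
--
--     return common_keys, home
-- ===== Notes on version B (the rewrite author's own statement) =====
-- stated objective: alternative
-- what changed: Replaces A's key-outer loop that re-tests every destination key against all travelers (with an is_common flag and early break) by a progressive set intersection: start from all destination keys and intersect once per traveler with that traveler's satisfied-key set (their results' keys union their home keys), using helper functions for the home map and the satisfied set.
import Mathlib
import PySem

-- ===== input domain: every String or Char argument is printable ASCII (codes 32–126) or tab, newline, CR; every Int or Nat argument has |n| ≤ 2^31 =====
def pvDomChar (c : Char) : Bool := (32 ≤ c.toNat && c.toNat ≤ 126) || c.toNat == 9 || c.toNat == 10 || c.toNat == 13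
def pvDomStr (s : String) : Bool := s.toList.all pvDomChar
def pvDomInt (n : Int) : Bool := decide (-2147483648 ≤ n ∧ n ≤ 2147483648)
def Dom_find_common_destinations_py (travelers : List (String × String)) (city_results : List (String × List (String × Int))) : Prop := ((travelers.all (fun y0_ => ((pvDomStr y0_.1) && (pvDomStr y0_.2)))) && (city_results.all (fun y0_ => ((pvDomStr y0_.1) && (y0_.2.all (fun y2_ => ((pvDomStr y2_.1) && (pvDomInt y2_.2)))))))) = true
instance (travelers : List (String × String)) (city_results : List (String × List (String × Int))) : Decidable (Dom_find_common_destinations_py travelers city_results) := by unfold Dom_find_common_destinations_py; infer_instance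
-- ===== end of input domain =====

-- B replaces A's key-outer loop (re-testing every destination key against all travelers) by one
-- progressive set intersection over travelers (alternative decomposition, same results).

-- ===== PORT A =====
def find_common_destinations_py (travelers : List (String × String)) (city_results : List (String × List (String × Int))) : List String × (List (String × List String)) :=
  let thk : PySem.Dict String (PySem.Set String) :=
    travelers.foldl (fun d p => d.insert p.2 (PySem.Set.ofList [p.1, p.2])) PySem.Dict.empty
  let cr : PySem.Dict String (List (String × Int)) := PySem.Dict.mk city_results
  let allKeys : PySem.Set String :=
    cr.values.foldl (fun s dm => PySem.Set.update s (PySem.Dict.mk dm).keys) PySem.Set.empty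
  let common : PySem.Set String :=
    allKeys.foldl (fun cs key =>
      let isCommon := travelers.all (fun p =>
        let hasResult := (PySem.Dict.mk (cr.getD p.2 [])).contains key
        let isHome := PySem.Set.contains (thk.getD p.2 []) key
        hasResult || isHome)
      if isCommon then PySem.Set.add cs key else cs) PySem.Set.empty
  (common, thk.items)

-- ===== PORT B =====
-- helper: {name: {code, name} for code, name in travelers}
def homeKeysB (travelers : List (String × String)) : PySem.Dict String (PySem.Set String) :=
  travelers.foldl (fun d p => d.insert p.2 (PySem.Set.ofList [p.1, p.2])) PySem.Dict.empty

-- helper: set(city_results.get(name, {})) | home[name]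
def satisfiedB (name : String) (city_results : List (String × List (String × Int)))
    (home : PySem.Dict String (PySem.Set String)) : PySem.Set String :=
  PySem.Set.union
    (PySem.Set.ofList (PySem.Dict.mk ((PySem.Dict.mk city_results).getD name [])).keys)
    (home.getD name [])

def find_common_destinations_py_alt (travelers : List (String × String)) (city_results : List (String × List (String × Int))) : List String × (List (String × List String)) :=
  let home := homeKeysB travelers
  let allDest : PySem.Set String :=
    (PySem.Dict.mk city_results).values.foldl
      (fun s dm => PySem.Set.union s (PySem.Set.ofList (PySem.Dict.mk dm).keys)) PySem.Set.empty
  let common : PySem.Set String :=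
    travelers.foldl (fun s p => PySem.Set.inter s (satisfiedB p.2 city_results home)) allDest
  (common, home.items)

-- ===== PRECONDITION & SPEC =====
def Spec_find_common_destinations_py (travelers : List (String × String)) (city_results : List (String × List (String × Int))) (out : List String × (List (String × List String))) : Prop := out = find_common_destinations_py_alt travelers city_results
instance (travelers : List (String × String)) (city_results : List (String × List (String × Int))) (out : List String × (List (String × List String))) : Decidable (Spec_find_common_destinations_py travelers city_results out) := by unfold Spec_find_common_destinations_py; infer_instance

-- ===== CLAIM (what is proved, stated in full; the proofs are below) =====
def Claim_equal_find_common_destinations_py : Prop := ∀ (travelers : List (String × String)) (city_results : List (String × List (String × Int))), Dom_find_common_destinations_py travelers city_results → Spec_find_common_destinations_py travelers city_results (find_common_destinations_py travelers city_results)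

-- ===== LEMMAS AND PROOFS =====

-- A's conditional-add fold over a duplicate-free key set is a filter
lemma foldl_add_filter (l : List String) (p : String → Bool) :
    ∀ acc : List String, l.Nodup → (∀ x ∈ l, x ∉ acc) →
      l.foldl (fun cs k => if p k then PySem.Set.add cs k else cs) acc = acc ++ l.filter p := by
  induction l with
  | nil => intro acc _ _; simp
  | cons k l ih =>
    intro acc hnd hdisj
    rw [List.foldl_cons]
    by_cases hp : p k = true
    · rw [if_pos hp, PySem.Set.add_of_not_mem (hdisj k (by simp))]
      rw [ih (acc ++ [k]) hnd.of_cons]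
      · simp [hp]
      · intro x hx
        simp only [List.mem_append, List.mem_singleton]
        push Not
        exact ⟨hdisj x (by simp [hx]), fun h => (List.nodup_cons.mp hnd).1 (h ▸ hx)⟩
    · rw [if_neg hp, ih acc hnd.of_cons (fun x hx => hdisj x (by simp [hx]))]
      simp [hp]

-- B's intersection fold over travelers is a filter by the "all travelers satisfied" predicate
lemma foldl_inter_filter (f : String × String → PySem.Set String) (l : List (String × String)) :
    ∀ s : List String, l.foldl (fun s q => PySem.Set.inter s (f q)) s
      = s.filter (fun k => l.all (fun q => PySem.Set.contains (f q) k)) := by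
  induction l with
  | nil => intro s; simp [List.filter_eq_self.mpr]
  | cons q l ih =>
    intro s
    rw [List.foldl_cons, ih]
    show (PySem.Set.inter s (f q)).filter _ = _
    have hinter : PySem.Set.inter s (f q) = s.filter (fun x => PySem.Set.contains (f q) x) := rfl
    rw [hinter, List.filter_filter]
    apply List.filter_congr
    intro x _
    simp [List.all_cons, Bool.and_comm]

-- the accumulated set of all destination keys is duplicate-free
lemma nodup_foldl_update (vals : List (List (String × Int))) :
    ∀ s : PySem.Set String, s.Nodup →
      (vals.foldl (fun s dm => PySem.Set.update s (PySem.Dict.mk dm).keys) s).Nodup := by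
  induction vals with
  | nil => intro s hs; exact hs
  | cons dm vals ih => intro s hs; exact ih _ (PySem.Set.nodup_update _ _ hs)

-- union with a deduplicated key list is exactly A's update with the raw key list
lemma union_ofList_eq_update (s : PySem.Set String) (xs : List String) :
    PySem.Set.union s (PySem.Set.ofList xs) = PySem.Set.update s xs := by
  show PySem.Set.update s (PySem.Set.ofList xs) = PySem.Set.update s xs
  rw [PySem.Set.update_eq_append_filter, PySem.Set.update_eq_append_filter,
    PySem.Set.ofList_ofList]

theorem find_common_destinations_py_eq :
    ∀ travelers city_results, find_common_destinations_py travelers city_results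
      = find_common_destinations_py_alt travelers city_results := by
  intro travelers city_results
  simp only [find_common_destinations_py, find_common_destinations_py_alt, homeKeysB]
  refine Prod.ext ?_ rfl
  simp only
  -- the two all-destination-keys sets coincide
  have hall : (PySem.Dict.mk city_results).values.foldl
      (fun s dm => PySem.Set.union s (PySem.Set.ofList (PySem.Dict.mk dm).keys)) PySem.Set.empty
      = (PySem.Dict.mk city_results).values.foldl
      (fun s dm => PySem.Set.update s (PySem.Dict.mk dm).keys) PySem.Set.empty := by
    apply PySem.List.foldl_congr_mem
    intro s dm _; exact union_ofList_eq_update _ _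
  rw [foldl_inter_filter, hall]
  simp only [PySem.Set.empty]
  rw [foldl_add_filter _
    (fun key => travelers.all fun p =>
      (PySem.Dict.mk ((PySem.Dict.mk city_results).getD p.2 [])).contains key ||
        PySem.Set.contains
          ((travelers.foldl (fun d p => d.insert p.2 (PySem.Set.ofList [p.1, p.2]))
              PySem.Dict.empty).getD p.2 []) key)
    _ (nodup_foldl_update _ _ List.nodup_nil) (by simp), List.nil_append]
  apply List.filter_congr
  intro key _
  apply List.all_congr rfl
  intro p
  simp only [satisfiedB]
  rw [Bool.eq_iff_iff]
  simp [PySem.Set.mem_union, PySem.Set.mem_ofList]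

-- ===== VERDICT (by name: the statement is the Claim_ definition above) =====
theorem find_common_destinations_py_spec : Claim_equal_find_common_destinations_py := by
  intro travelers city_results _
  exact find_common_destinations_py_eq travelers city_results
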